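-- pv_equiv track=rewrite | github.com/icaroccaetano/EduLog | lesson_logs.py | parse_alunos
-- ===== SOURCE A (Python) =====
-- def _normalize_text(value: str) -> str:
--     return " ".join(value.strip().split())
--
-- def parse_alunos(raw_value: str) -> list[str]:
--     parts = []
--     for chunk in raw_value.replace("\r", "\n").split("\n"):
--         for part in chunk.split(","):
--             normalized = _normalize_text(part)
--             if normalized:
--                 parts.append(normalized)
--     return parts
-- ===== SOURCE B (Python) =====
-- def parse_alunos(raw_value: str) -> list[str]:
--     # Single character-level pass (state machine) instead of nested split/normalize loops.
--     parts = []
--     words = []  # whitespace-normalized words of the current name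
--     cur = []    # characters of the word being read
--     for ch in raw_value:
--         if ch in ",\n\r":
--             if cur:
--                 words.append("".join(cur))
--                 cur = []
--             if words:
--                 parts.append(" ".join(words))
--                 words = []
--         elif ch.isspace():
--             if cur:
--                 words.append("".join(cur))
--                 cur = []
--         else:
--             cur.append(ch)
--     if cur:
--         words.append("".join(cur))
--     if words:
--         parts.append(" ".join(words))
--     return parts
-- ===== Notes on version B (the rewrite author's own statement) =====
-- stated objective: alternative
-- what changed: Replaced A's two-level split (replace \r, split on \n, split on ',') plus per-piece strip/split/join normalization with a single character-level state machine that scans the string once, accumulating the current word and the current name's words and emitting a name at each delimiter.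
import Mathlib
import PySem

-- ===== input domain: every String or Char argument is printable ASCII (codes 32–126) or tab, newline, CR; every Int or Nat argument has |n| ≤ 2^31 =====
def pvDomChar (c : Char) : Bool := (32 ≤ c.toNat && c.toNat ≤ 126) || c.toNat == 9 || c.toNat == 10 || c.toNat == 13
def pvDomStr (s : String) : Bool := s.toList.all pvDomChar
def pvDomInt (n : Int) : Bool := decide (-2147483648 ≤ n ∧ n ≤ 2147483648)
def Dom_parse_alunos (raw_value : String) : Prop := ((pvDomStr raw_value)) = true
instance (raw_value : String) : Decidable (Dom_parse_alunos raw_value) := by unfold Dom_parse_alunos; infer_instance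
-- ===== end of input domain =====

-- B replaces A's two-level split plus per-piece strip/split/join normalization by a single
-- character-level state machine over the string (objective: alternative decomposition, same O(n) cost).

-- ===== PORT A =====
def pv_normalize_text (value : String) : String :=
  PySem.Str.join " " (PySem.Str.split₀ (PySem.Str.strip value))

-- the separators are the nonempty literals "\n" and ",", so `split?` is always `some` and `getD []` is never used
def parse_alunos (raw_value : String) : List String :=
  ((PySem.Str.split? (PySem.Str.replace raw_value "\r" "\n") "\n").getD []).foldl
    (fun parts chunk =>
      ((PySem.Str.split? chunk ",").getD []).foldl
        (fun parts part =>
          let normalized := pv_normalize_text part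
          if normalized ≠ "" then parts ++ [normalized] else parts)
        parts)
    []

-- ===== PORT B =====
-- state machine of Source B: cur = characters of the word being read, words = finished words of the
-- current name, parts = finished names ("".join(cur) is cur itself; " ".join is PySem.Chars.join [' '])
def pvScan : List Char → List Char → List (List Char) → List String → List String
  | [], cur, words, parts =>
      let words' := if cur ≠ [] then words ++ [cur] else words
      if words' ≠ [] then parts ++ [String.ofList (PySem.Chars.join [' '] words')] else parts
  | c :: cs, cur, words, parts =>
      if c = ',' ∨ c = '\n' ∨ c = '\r' then
        let words' := if cur ≠ [] then words ++ [cur] else words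
        pvScan cs [] [] (if words' ≠ [] then parts ++ [String.ofList (PySem.Chars.join [' '] words')] else parts)
      else if PySem.Chars.isspace c then
        pvScan cs [] (if cur ≠ [] then words ++ [cur] else words) parts
      else
        pvScan cs (cur ++ [c]) words parts

def parse_alunos_alt (raw_value : String) : List String :=
  pvScan raw_value.toList [] [] []

-- ===== PRECONDITION & SPEC =====
def Spec_parse_alunos (raw_value : String) (out : List String) : Prop := out = parse_alunos_alt raw_value
instance (raw_value : String) (out : List String) : Decidable (Spec_parse_alunos raw_value out) := by unfold Spec_parse_alunos; infer_instance

-- ===== CLAIM (what is proved, stated in full; the proofs are below) =====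
def Claim_equal_parse_alunos : Prop := ∀ (raw_value : String), Dom_parse_alunos raw_value → Spec_parse_alunos raw_value (parse_alunos raw_value)

-- ===== LEMMAS AND PROOFS =====
-- reference normal form both ports are reduced to: split on the delimiter class {',', '\n', '\r'}
-- (pvSplitD), then emit the whitespace-separated words of each token, joined by single spaces.
def pvIsDelim (c : Char) : Bool := c == ',' || c == '\n' || c == '\r'

def pvSplit1 (d : Char) : List Char → List (List Char)
  | [] => [[]]
  | c :: t => if c = d then [] :: pvSplit1 d t else (pvSplit1 d t).modifyHead (c :: ·)

def pvSplitD : List Char → List (List Char)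
  | [] => [[]]
  | c :: t => if pvIsDelim c then [] :: pvSplitD t else (pvSplitD t).modifyHead (c :: ·)

def pvSubst (c : Char) : Char := if c = '\r' then '\n' else c

def pvEmit (ws : List (List Char)) : List String :=
  if ws = [] then [] else [String.ofList (PySem.Chars.join [' '] ws)]

def pvTok (t : List Char) : List String := pvEmit (PySem.Chars.split₀ t)

theorem pvSplit1_ne_nil (d : Char) (l : List Char) : pvSplit1 d l ≠ [] := by
  induction l with
  | nil => simp [pvSplit1]
  | cons c t ih => simp [pvSplit1]; split <;> simp [ih]

theorem pvSplitD_ne_nil (l : List Char) : pvSplitD l ≠ [] := by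
  induction l with
  | nil => simp [pvSplitD]
  | cons c t ih => simp [pvSplitD]; split <;> simp [ih]

theorem splitOn_go_single (d : Char) :
    ∀ (l : List Char) (fuel : Nat) (cur : List Char) (acc : List (List Char)), l.length < fuel →
      PySem.Chars.splitOn.go [d] fuel l cur acc
        = acc.reverse ++ (pvSplit1 d l).modifyHead (cur.reverse ++ ·) := by
  intro l
  induction l with
  | nil =>
    intro fuel cur acc h
    cases fuel with
    | zero => omega
    | succ f => simp [PySem.Chars.splitOn.go, pvSplit1]
  | cons c t ih =>
    intro fuel cur acc h
    cases fuel with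
    | zero => omega
    | succ f =>
      simp only [PySem.Chars.splitOn.go]
      by_cases hc : c = d
      · subst hc
        rw [if_pos (by simp [List.isPrefixOf])]
        simp only [List.length_cons, List.length_nil, Nat.zero_add, List.drop_succ_cons, List.drop_zero]
        rw [ih f [] _ (by simp at h; omega)]
        simp [pvSplit1, List.modifyHead]
        cases pvSplit1 c t <;> rfl
      · have hp : ([d].isPrefixOf (c :: t)) = false := by
          simp [List.isPrefixOf]
          exact fun h' => (hc (by simpa using h'.symm)).elim
        rw [if_neg (by simp [hp])]
        rw [ih f _ _ (by simp at h; omega)]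
        simp only [pvSplit1, if_neg hc, List.modifyHead_modifyHead, List.reverse_cons]
        congr 2
        funext x
        simp

theorem splitOn_single (d : Char) (l : List Char) :
    PySem.Chars.splitOn l [d] = pvSplit1 d l := by
  rw [PySem.Chars.splitOn, splitOn_go_single d l _ [] [] (by omega)]
  simp
  cases pvSplit1 d l <;> rfl

theorem replace_go_single (a b : Char) :
    ∀ (l : List Char) (fuel : Nat) (acc : List Char), l.length ≤ fuel →
      PySem.Chars.replace.go [a] [b] fuel l acc
        = acc.reverse ++ l.map (fun c => if c = a then b else c) := by
  intro l
  induction l with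
  | nil =>
    intro fuel acc h
    cases fuel with
    | zero => simp [PySem.Chars.replace.go]
    | succ f => simp [PySem.Chars.replace.go]
  | cons c t ih =>
    intro fuel acc h
    cases fuel with
    | zero => simp at h
    | succ f =>
      simp only [PySem.Chars.replace.go]
      by_cases hc : c = a
      · subst hc
        rw [if_pos (by simp [List.isPrefixOf])]
        simp only [List.length_cons, List.length_nil, Nat.zero_add, List.drop_succ_cons, List.drop_zero]
        rw [ih f _ (by simp at h; omega)]
        simp
      · have hp : ([a].isPrefixOf (c :: t)) = false := by
          simp [List.isPrefixOf]
          exact fun h' => (hc (by simpa using h'.symm)).elim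
        rw [if_neg (by simp [hp])]
        rw [ih f _ (by simp at h; omega)]
        simp [hc]

theorem replace_single (l : List Char) :
    PySem.Chars.replace l ['\r'] ['\n'] = l.map pvSubst := by
  rw [PySem.Chars.replace]
  rw [if_neg (by simp)]
  rw [replace_go_single _ _ l l.length [] (le_refl _)]
  simp [pvSubst]

theorem flatMap_comma_nl (l : List Char) :
    (pvSplit1 '\n' (l.map pvSubst)).flatMap (pvSplit1 ',') = pvSplitD l := by
  induction l with
  | nil => simp [pvSplit1, pvSplitD]
  | cons c t ih =>
    simp only [List.map_cons]
    by_cases hnl : pvSubst c = '\n'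
    · have hd : pvIsDelim c = true := by
        by_cases h1 : c = '\r' <;> simp [pvSubst, h1] at hnl ⊢ <;> simp [pvIsDelim, h1, hnl]
      simp only [pvSplit1, if_pos hnl, pvSplitD, if_pos hd, List.flatMap_cons]
      rw [← ih]
      rfl
    · obtain ⟨h, tl, hX⟩ : ∃ h tl, pvSplit1 '\n' (t.map pvSubst) = h :: tl := by
        cases hX : pvSplit1 '\n' (t.map pvSubst) with
        | nil => exact absurd hX (pvSplit1_ne_nil _ _)
        | cons h tl => exact ⟨h, tl, rfl⟩
      have hc : pvSubst c = c := by
        by_cases h1 : c = '\r' <;> simp [pvSubst, h1] at hnl ⊢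
      rw [hc] at hnl ⊢
      simp only [pvSplit1, if_neg hnl, hX, List.modifyHead, List.flatMap_cons]
      by_cases hcm : c = ','
      · subst hcm
        have hd : pvIsDelim ',' = true := by decide
        simp only [pvSplit1, if_pos rfl, pvSplitD, if_pos hd]
        rw [← ih, hX]
        simp
      · have hr : c ≠ '\r' := by
          intro h1
          rw [h1] at hc
          simp [pvSubst] at hc
        have hd : pvIsDelim c = false := by
          simp [pvIsDelim, hcm, hnl, hr]
        simp only [pvSplit1, if_neg hcm, pvSplitD, hd, Bool.false_eq_true, if_false]
        rw [← ih, hX]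
        obtain ⟨h2, tl2, hY⟩ : ∃ h2 tl2, pvSplit1 ',' h = h2 :: tl2 := by
          cases hY : pvSplit1 ',' h with
          | nil => exact absurd hY (pvSplit1_ne_nil _ _)
          | cons h2 tl2 => exact ⟨h2, tl2, rfl⟩
        simp [hY, List.modifyHead]

theorem split0_go_acc : ∀ (s cur : List Char) (acc : List (List Char)),
    PySem.Chars.split₀.go s cur acc = acc.reverse ++ PySem.Chars.split₀.go s cur [] := by
  intro s
  induction s with
  | nil =>
    intro cur acc
    simp only [PySem.Chars.split₀.go]
    by_cases hc : cur.isEmpty <;> simp [hc]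
  | cons c rest ih =>
    intro cur acc
    simp only [PySem.Chars.split₀.go]
    by_cases hs : PySem.Chars.isspace c
    · by_cases hc : cur.isEmpty <;> simp only [hs, hc, if_true, if_false, Bool.false_eq_true]
      · rw [ih [] acc]
      · rw [ih [] (cur.reverse :: acc), ih [] [cur.reverse]]
        simp
    · simp only [hs, Bool.false_eq_true, if_false]
      rw [ih (c :: cur) acc]

theorem split0_go_word : ∀ (w s cur : List Char) (acc : List (List Char)),
    (∀ c ∈ w, PySem.Chars.isspace c = false) →
    PySem.Chars.split₀.go (w ++ s) cur acc = PySem.Chars.split₀.go s (w.reverse ++ cur) acc := by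
  intro w
  induction w with
  | nil => intro s cur acc _; simp
  | cons c t ih =>
    intro s cur acc hw
    have hc : PySem.Chars.isspace c = false := hw c (by simp)
    simp only [List.cons_append, PySem.Chars.split₀.go, hc, Bool.false_eq_true, if_false]
    rw [ih s (c :: cur) acc (fun x hx => hw x (by simp [hx]))]
    simp

theorem split0_cons_space {c : Char} (h : PySem.Chars.isspace c = true) (s : List Char) :
    PySem.Chars.split₀ (c :: s) = PySem.Chars.split₀ s := by
  simp [PySem.Chars.split₀, PySem.Chars.split₀.go, h]

theorem split0_word {w : List Char} (hw : w ≠ []) (hns : ∀ c ∈ w, PySem.Chars.isspace c = false) :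
    PySem.Chars.split₀ w = [w] := by
  rw [PySem.Chars.split₀, show w = w ++ [] by simp, split0_go_word w [] [] [] hns]
  simp [PySem.Chars.split₀.go, List.isEmpty_eq_false_iff.2 (by simpa using hw)]

theorem split0_word_space {w : List Char} {c : Char} (hw : w ≠ [])
    (hns : ∀ c ∈ w, PySem.Chars.isspace c = false) (hc : PySem.Chars.isspace c = true) (s : List Char) :
    PySem.Chars.split₀ (w ++ c :: s) = w :: PySem.Chars.split₀ s := by
  rw [PySem.Chars.split₀, split0_go_word w (c :: s) [] [] hns]
  simp only [PySem.Chars.split₀.go, hc, if_true]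
  rw [if_neg (by simp [List.isEmpty_eq_false_iff.2 (by simpa using hw)]), split0_go_acc]
  simp [PySem.Chars.split₀]

theorem split0_go_allspace {v : List Char} (hv : ∀ c ∈ v, PySem.Chars.isspace c = true) :
    ∀ (cur : List Char) (acc : List (List Char)),
    PySem.Chars.split₀.go v cur acc = PySem.Chars.split₀.go [] cur acc := by
  induction v with
  | nil => intro cur acc; rfl
  | cons c t ih =>
    intro cur acc
    have hc := hv c (by simp)
    simp only [PySem.Chars.split₀.go, hc, if_true]
    by_cases hcur : cur.isEmpty <;> simp only [hcur, if_true, if_false, Bool.false_eq_true]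
    · simp only [List.isEmpty_iff] at hcur
      subst hcur
      rw [ih (fun x hx => hv x (by simp [hx])) [] acc]
      simp [PySem.Chars.split₀.go]
    · rw [ih (fun x hx => hv x (by simp [hx])) [] (cur.reverse :: acc)]
      simp [PySem.Chars.split₀.go, hcur]

theorem split0_append_space {v : List Char} (hv : ∀ c ∈ v, PySem.Chars.isspace c = true) :
    ∀ (s : List Char), PySem.Chars.split₀ (s ++ v) = PySem.Chars.split₀ s := by
  have go_lemma : ∀ (s cur : List Char) (acc : List (List Char)),
      PySem.Chars.split₀.go (s ++ v) cur acc = PySem.Chars.split₀.go s cur acc := by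
    intro s
    induction s with
    | nil => intro cur acc; simpa using split0_go_allspace hv cur acc
    | cons c t ih =>
      intro cur acc
      simp only [List.cons_append, PySem.Chars.split₀.go]
      by_cases hs : PySem.Chars.isspace c <;> by_cases hc : cur.isEmpty <;>
        simp only [hs, hc, if_true, if_false, Bool.false_eq_true] <;> rw [ih]
  intro s
  simp [PySem.Chars.split₀, go_lemma]

theorem split0_lstrip (s : List Char) :
    PySem.Chars.split₀ (PySem.Chars.lstrip s) = PySem.Chars.split₀ s := by
  rw [PySem.Chars.lstrip]
  induction s with
  | nil => rfl
  | cons c t ih =>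
    by_cases hc : PySem.Chars.isspace c
    · rw [List.dropWhile_cons_of_pos (by simpa using hc), ih, split0_cons_space hc]
    · rw [List.dropWhile_cons_of_neg (by simpa using hc)]

theorem split0_strip (s : List Char) :
    PySem.Chars.split₀ (PySem.Chars.strip s) = PySem.Chars.split₀ s := by
  rw [PySem.Chars.strip, ← split0_lstrip s]
  set u := PySem.Chars.lstrip s with hu
  have hdecomp : u = PySem.Chars.rstrip u ++ (u.reverse.takeWhile PySem.Chars.isspace).reverse := by
    rw [PySem.Chars.rstrip]
    have := List.takeWhile_append_dropWhile (p := PySem.Chars.isspace) (l := u.reverse)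
    calc u = u.reverse.reverse := by simp
    _ = (u.reverse.takeWhile PySem.Chars.isspace ++ u.reverse.dropWhile PySem.Chars.isspace).reverse := by rw [this]
    _ = _ := by rw [List.reverse_append]
  conv_rhs => rw [hdecomp]
  rw [split0_append_space (fun c hc => by
    have := List.mem_takeWhile_imp (by simpa using hc)
    simpa using this)]

theorem split0_go_ne_nil : ∀ (s cur : List Char) (acc : List (List Char)),
    (∀ w ∈ acc, w ≠ []) → ∀ w ∈ PySem.Chars.split₀.go s cur acc, w ≠ [] := by
  intro s
  induction s with
  | nil =>
    intro cur acc hacc w hw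
    simp only [PySem.Chars.split₀.go] at hw
    by_cases hc : cur.isEmpty
    · rw [if_pos hc] at hw; exact hacc w (by simpa using hw)
    · rw [if_neg hc] at hw
      simp at hw
      rcases hw with h | h
      · exact hacc w h
      · subst h; simp at hc; simpa using hc
  | cons c t ih =>
    intro cur acc hacc w hw
    simp only [PySem.Chars.split₀.go] at hw
    by_cases hs : PySem.Chars.isspace c
    · rw [if_pos hs] at hw
      by_cases hc : cur.isEmpty
      · rw [if_pos hc] at hw; exact ih [] acc hacc w hw
      · rw [if_neg hc] at hw
        refine ih [] (cur.reverse :: acc) ?_ w hw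
        intro x hx
        simp at hx
        rcases hx with h | h
        · subst h; simp at hc; simpa using hc
        · exact hacc x h
    · rw [if_neg hs] at hw
      exact ih (c :: cur) acc hacc w hw

theorem split0_words_ne_nil : ∀ (s : List Char), ∀ w ∈ PySem.Chars.split₀ s, w ≠ [] := by
  intro s
  exact split0_go_ne_nil s [] [] (by simp)

theorem join_ne_nil {ws : List (List Char)} (h : ws ≠ []) (h2 : ∀ w ∈ ws, w ≠ []) :
    PySem.Chars.join [' '] ws ≠ [] := by
  match ws, h with
  | [w], _ =>
    have := h2 w (by simp)
    simpa [PySem.Chars.join, List.intercalate] using this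
  | w :: x :: xs, _ =>
    rw [PySem.Chars.join_cons_cons]
    have := h2 w (by simp)
    simp [this]

theorem normalize_toList (p : String) :
    (pv_normalize_text p).toList = PySem.Chars.join [' '] (PySem.Chars.split₀ p.toList) := by
  rw [pv_normalize_text, PySem.Str.toList_join, PySem.Str.split₀_map_toList, PySem.Str.toList_strip,
    split0_strip]
  rfl

theorem strSplit_eq (s d : String) (hd : d.toList ≠ []) :
    (PySem.Str.split? s d).getD [] = (PySem.Chars.splitOn s.toList d.toList).map String.ofList := by
  have h := PySem.Str.split?_map s d
  rw [PySem.Chars.split?, if_neg (by simpa using hd)] at h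
  cases hsp : PySem.Str.split? s d with
  | none => rw [hsp] at h; simp at h
  | some L =>
    rw [hsp] at h
    simp only [Option.map_some, Option.some.injEq] at h
    rw [Option.getD_some, ← h, List.map_map]
    simp [Function.comp_def, String.ofList_toList]

theorem emit_of_normalize (p : String) :
    (if pv_normalize_text p ≠ "" then [pv_normalize_text p] else [])
      = pvEmit (PySem.Chars.split₀ p.toList) := by
  have hto := normalize_toList p
  by_cases hw : PySem.Chars.split₀ p.toList = []
  · rw [pvEmit, if_pos hw]
    rw [hw] at hto
    have : pv_normalize_text p = "" := by
      have : (pv_normalize_text p).toList = [] := by simpa [PySem.Chars.join, List.intercalate] using hto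
      exact String.toList_eq_nil_iff.mp this
    simp [this]
  · rw [pvEmit, if_neg hw]
    have hne : pv_normalize_text p ≠ "" := by
      intro h0
      have : (pv_normalize_text p).toList = [] := by simp [h0]
      rw [hto] at this
      exact join_ne_nil hw (split0_words_ne_nil _) this
    rw [if_pos hne]
    have : String.ofList (pv_normalize_text p).toList = String.ofList (PySem.Chars.join [' '] (PySem.Chars.split₀ p.toList)) := by rw [hto]
    rw [String.ofList_toList] at this
    rw [← this]

theorem A_inner (l : List String) (parts : List String) :
    l.foldl (fun parts part =>
        let normalized := pv_normalize_text part
        if normalized ≠ "" then parts ++ [normalized] else parts) parts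
      = parts ++ l.flatMap (fun p => pvEmit (PySem.Chars.split₀ p.toList)) := by
  induction l generalizing parts with
  | nil => simp
  | cons p t ih =>
    simp only [List.foldl_cons, List.flatMap_cons]
    rw [ih]
    rw [← emit_of_normalize p]
    by_cases h : pv_normalize_text p ≠ "" <;> simp [h]

theorem A_normal (raw_value : String) :
    parse_alunos raw_value = (pvSplitD raw_value.toList).flatMap pvTok := by
  rw [parse_alunos]
  simp only [A_inner]
  rw [PySem.List.foldl_append_eq_flatMap, List.nil_append]
  rw [strSplit_eq _ "\n" (by decide)]
  have hrep : (PySem.Str.replace raw_value "\r" "\n").toList = raw_value.toList.map pvSubst := by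
    rw [PySem.Str.toList_replace]
    exact replace_single _
  rw [hrep, show ("\n" : String).toList = ['\n'] from rfl, splitOn_single]
  rw [List.flatMap_map]
  have hinner : ∀ cs : List Char,
      ((PySem.Str.split? (String.ofList cs) ",").getD []).flatMap (fun p => pvEmit (PySem.Chars.split₀ p.toList))
        = (pvSplit1 ',' cs).flatMap (fun pcs => pvEmit (PySem.Chars.split₀ pcs)) := by
    intro cs
    rw [strSplit_eq _ "," (by decide), String.toList_ofList,
      show ("," : String).toList = [','] from rfl, splitOn_single, List.flatMap_map]
    simp [Function.comp_def, String.toList_ofList]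
  simp only [hinner]
  rw [← List.flatMap_assoc, flatMap_comma_nl]
  rfl

theorem pvScan_parts : ∀ (cs cur : List Char) (words : List (List Char)) (parts : List String),
    pvScan cs cur words parts = parts ++ pvScan cs cur words [] := by
  intro cs
  induction cs with
  | nil =>
    intro cur words parts
    simp only [pvScan]
    split <;> split <;> simp
  | cons c t ih =>
    intro cur words parts
    simp only [pvScan]
    split
    · rw [ih]
      conv_rhs => rw [ih]
      split <;> (try split) <;> simp
    · split <;> rw [ih]

theorem split0_nonspace (cur : List Char) (hcur : ∀ c ∈ cur, PySem.Chars.isspace c = false) :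
    PySem.Chars.split₀ cur = if cur = [] then [] else [cur] := by
  by_cases h : cur = []
  · subst h; rfl
  · rw [if_neg h]; exact split0_word h hcur

theorem pvScan_spec : ∀ (cs cur : List Char) (words : List (List Char)),
    (∀ c ∈ cur, PySem.Chars.isspace c = false ∧ pvIsDelim c = false) →
    ∀ (t : List Char) (ts : List (List Char)), pvSplitD cs = t :: ts →
    pvScan cs cur words []
      = pvEmit (words ++ PySem.Chars.split₀ (cur ++ t)) ++ ts.flatMap pvTok := by
  intro cs
  induction cs with
  | nil =>
    intro cur words hcur t ts hsplit
    simp only [pvSplitD, List.cons.injEq] at hsplit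
    obtain ⟨rfl, rfl⟩ := hsplit
    simp only [pvScan, List.append_nil, List.flatMap_nil]
    rw [split0_nonspace cur (fun c hc => (hcur c hc).1)]
    by_cases h : cur = [] <;> simp only [h, if_true, if_false] <;> rw [pvEmit] <;>
      by_cases hw : words = [] <;> simp_all
  | cons c cs' ih =>
    intro cur words hcur t ts hsplit
    obtain ⟨t', ts', hX⟩ : ∃ t' ts', pvSplitD cs' = t' :: ts' := by
      cases hX : pvSplitD cs' with
      | nil => exact absurd hX (pvSplitD_ne_nil _)
      | cons a b => exact ⟨a, b, rfl⟩
    by_cases hd : c = ',' ∨ c = '\n' ∨ c = '\r'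
    · have hdelim : pvIsDelim c = true := by
        rcases hd with h | h | h <;> simp [pvIsDelim, h]
      rw [pvSplitD, if_pos hdelim] at hsplit
      injection hsplit with h1 h2
      subst h1; subst h2
      -- LHS: flush cur and words, emit, restart with empty state
      rw [pvScan, if_pos hd, pvScan_parts]
      rw [ih [] [] (by simp) t' ts' hX]
      simp only [List.nil_append, List.append_nil, hX, List.flatMap_cons]
      rw [split0_nonspace cur (fun c hc => (hcur c hc).1)]
      have hwords : (if cur ≠ [] then words ++ [cur] else words)
          = words ++ (if cur = [] then [] else [cur]) := by
        by_cases h : cur = [] <;> simp [h]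
      rw [hwords]
      have : (if (words ++ if cur = [] then [] else [cur]) ≠ [] then
            [String.ofList (PySem.Chars.join [' '] (words ++ if cur = [] then [] else [cur]))] else [])
          = pvEmit (words ++ if cur = [] then [] else [cur]) := by
        rw [pvEmit]
        split <;> simp_all
      rw [this]
      rfl
    · have hdelim : pvIsDelim c = false := by
        push_neg at hd
        simp [pvIsDelim, hd.1, hd.2.1, hd.2.2]
      rw [pvSplitD, if_neg (by simp [hdelim]), hX, List.modifyHead] at hsplit
      injection hsplit with h1 h2
      subst h1; subst h2
      by_cases hs : PySem.Chars.isspace c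
      · rw [pvScan, if_neg hd, if_pos hs]
        rw [ih [] _ (by simp) t' ts' hX]
        simp only [List.nil_append]
        congr 1
        by_cases h : cur = []
        · simp only [h, if_neg (by simp : ¬([] : List Char) ≠ [])]
          rw [show ([] : List Char) ++ c :: t' = c :: t' by simp, split0_cons_space hs]
        · rw [if_pos h, split0_word_space h (fun x hx => (hcur x hx).1) hs]
          simp
      · rw [pvScan, if_neg hd, if_neg hs]
        rw [ih (cur ++ [c]) words ?hc t' ts' hX]
        · congr 3
          simp
        · intro x hx
          simp at hx
          rcases hx with h | h
          · exact hcur x h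
          · subst h; exact ⟨by simpa using hs, hdelim⟩

theorem B_normal (raw_value : String) :
    parse_alunos_alt raw_value = (pvSplitD raw_value.toList).flatMap pvTok := by
  rw [parse_alunos_alt]
  obtain ⟨t, ts, hX⟩ : ∃ t ts, pvSplitD raw_value.toList = t :: ts := by
    cases hX : pvSplitD raw_value.toList with
    | nil => exact absurd hX (pvSplitD_ne_nil _)
    | cons a b => exact ⟨a, b, rfl⟩
  rw [pvScan_spec raw_value.toList [] [] (by simp) t ts hX, hX]
  simp [pvTok]

-- ===== VERDICT (by name: the statement is the Claim_ definition above) =====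
theorem parse_alunos_spec : Claim_equal_parse_alunos := by
  intro raw_value _
  unfold Spec_parse_alunos
  rw [A_normal, B_normal]
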